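-- pv_equiv track=rewrite | github.com/furkankyildirim/SUprerequisites | Service/analysis.py | is_ambiguous
-- ===== SOURCE A (Python) =====
-- def is_ambiguous(prereq_text):
--     # see if the top level (outside paranthesis) has all same connector (| or &)
--     connector = ""
--     inside_brackets = False
--     substatement = ""
--     for c in prereq_text:
--         if inside_brackets:
--             if c == ")":
--                 if is_ambiguous(substatement):
--                     return True
--                 inside_brackets = False
--                 substatement = ""
--             else:
--                 substatement += c
--         elif c == "(":
--             inside_brackets = True
--         elif c == "|" or c == "&":
--             if connector:
--                 if c != connector:
--                     return True
--             else:
--                connector = c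
--     return False
-- ===== SOURCE B (Python) =====
-- def is_ambiguous(prereq_text):
--     # index scan: extract depth-1 groups with find(')'), track the first top-level connector
--     connector = ""
--     i = 0
--     n = len(prereq_text)
--     while i < n:
--         c = prereq_text[i]
--         if c == "(":
--             j = prereq_text.find(")", i + 1)
--             if j == -1:
--                 return False
--             if is_ambiguous(prereq_text[i + 1:j]):
--                 return True
--             i = j + 1
--         elif c == "|" or c == "&":
--             if connector and c != connector:
--                 return True
--             connector = c
--             i += 1
--         else:
--             i += 1
--     return False
-- ===== Notes on version B (the rewrite author's own statement) =====
-- stated objective: alternative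
-- what changed: B replaces A's per-character state machine (inside_brackets flag plus substatement accumulator) with an explicit index scan that extracts each depth-1 bracket group at once using str.find of the closing bracket, keeping A's non-nesting group semantics.
import Mathlib
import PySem

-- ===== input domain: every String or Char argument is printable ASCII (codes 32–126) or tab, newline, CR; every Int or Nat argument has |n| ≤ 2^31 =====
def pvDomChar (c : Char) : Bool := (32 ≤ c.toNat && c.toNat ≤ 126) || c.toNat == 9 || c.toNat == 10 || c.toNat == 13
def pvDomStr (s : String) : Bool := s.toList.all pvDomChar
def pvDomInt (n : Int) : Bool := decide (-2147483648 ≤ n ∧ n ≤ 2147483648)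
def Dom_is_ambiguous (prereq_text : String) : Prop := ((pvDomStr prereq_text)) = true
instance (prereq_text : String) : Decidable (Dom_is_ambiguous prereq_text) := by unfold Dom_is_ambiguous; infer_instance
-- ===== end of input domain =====

-- B replaces A's per-character accumulation of bracket contents with an index/find-based
-- extraction of each depth-1 group (objective: alternative decomposition, same cost).

-- ===== PORT A =====
-- A's loop over the characters; connector "" is ported as [], c != connector as [c] ≠ connector.
def goA (connector : List Char) (inside : Bool) (sub : List Char) (cs : List Char) : Bool :=
  match cs with
  | [] => false
  | c :: rest =>
    if inside then
      if c = ')' then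
        if goA [] false [] sub then true
        else goA connector false [] rest
      else goA connector true (sub ++ [c]) rest
    else if c = '(' then goA connector true [] rest
    else if c = '|' ∨ c = '&' then
      if connector ≠ [] then
        if [c] ≠ connector then true else goA connector false [] rest
      else goA [c] false [] rest
    else goA connector false [] rest
termination_by (sub.length + cs.length, cs.length)
decreasing_by all_goals (simp_all; omega)

def is_ambiguous (prereq_text : String) : Bool := goA [] false [] prereq_text.toList

-- ===== PORT B =====
-- B's index scan: prereq_text.find(")", i+1) is ported as takeWhile (· ≠ ')') of the tail
-- (its length is the distance to the first ')'; equal to the tail's length means "not found").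
def goB (connector : List Char) (cs : List Char) : Bool :=
  match cs with
  | [] => false
  | c :: rest =>
    if c = '(' then
      let sub := rest.takeWhile (· ≠ ')')
      if sub.length = rest.length then false
      else if goB [] sub then true
      else goB connector (rest.drop (sub.length + 1))
    else if c = '|' ∨ c = '&' then
      if connector ≠ [] ∧ [c] ≠ connector then true
      else goB [c] rest
    else goB connector rest
termination_by cs.length
decreasing_by
  · have := (List.takeWhile_sublist (l := rest) (p := fun c => decide (c ≠ ')'))).length_le
    simp only [List.length_cons]; omega
  · simp only [List.length_cons, List.length_drop]; omega
  · simp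
  · simp

def is_ambiguous_alt (prereq_text : String) : Bool := goB [] prereq_text.toList

-- ===== PRECONDITION & SPEC =====
def Spec_is_ambiguous (prereq_text : String) (out : Bool) : Prop := out = is_ambiguous_alt prereq_text
instance (prereq_text : String) (out : Bool) : Decidable (Spec_is_ambiguous prereq_text out) := by unfold Spec_is_ambiguous; infer_instance

-- ===== CLAIM (what is proved, stated in full; the proofs are below) =====
def Claim_equal_is_ambiguous : Prop := ∀ (prereq_text : String), Dom_is_ambiguous prereq_text → Spec_is_ambiguous prereq_text (is_ambiguous prereq_text)

-- ===== LEMMAS AND PROOFS =====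

-- Inside a bracket, A's accumulation equals: split the remainder at the first ')',
-- test acc ++ prefix recursively, then continue after it.
theorem goA_inside (cs : List Char) : ∀ (acc conn : List Char),
    goA conn true acc cs =
      (if (cs.takeWhile (· ≠ ')')).length = cs.length then false
       else if goA [] false [] (acc ++ cs.takeWhile (· ≠ ')')) then true
       else goA conn false [] (cs.drop ((cs.takeWhile (· ≠ ')')).length + 1))) := by
  induction cs with
  | nil => intro acc conn; simp [goA]
  | cons c rest ih =>
    intro acc conn
    by_cases hc : c = ')'
    · subst hc
      rw [goA]
      simp [List.takeWhile]
    · rw [goA]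
      simp only [if_neg hc, ih (acc ++ [c]) conn,
        List.takeWhile_cons, decide_eq_true_eq, if_pos hc, List.length_cons,
        List.append_assoc, List.singleton_append, List.drop_succ_cons,
        Nat.add_right_cancel_iff, if_true]

-- Main: the two scans agree from the top-level state.
theorem goA_eq_goB (n : Nat) : ∀ (cs : List Char), cs.length ≤ n → ∀ (conn : List Char),
    goA conn false [] cs = goB conn cs := by
  induction n with
  | zero =>
    intro cs h conn
    have : cs = [] := List.length_eq_zero_iff.mp (Nat.le_zero.mp h)
    subst this; simp [goA, goB]
  | succ n ih =>
    intro cs h conn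
    match cs with
    | [] => simp [goA, goB]
    | c :: rest =>
      simp only [List.length_cons, Nat.add_le_add_iff_right] at h
      by_cases hp : c = '('
      · subst hp
        rw [goA, goB]
        simp only [if_neg (by decide : ¬('(' : Char) = ')'),
          reduceCtorEq, if_false, show ¬(('(' : Char) = '|' ∨ ('(' : Char) = '&') by decide,
          goA_inside rest [] conn, List.nil_append]
        have hsub : (rest.takeWhile (· ≠ ')')).length ≤ rest.length :=
          (List.takeWhile_sublist _).length_le
        simp only [ih _ (le_trans hsub h) [], ih _ (by simp; omega : (rest.drop ((rest.takeWhile (· ≠ ')')).length + 1)).length ≤ n) conn, if_true]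
      · by_cases hcc : c = '|' ∨ c = '&'
        · have hcr : ¬(c = ')') := by rcases hcc with h'|h' <;> subst h' <;> decide
          rw [goA, goB]
          by_cases hne : conn = []
          · simp [hp, hcc, hcr, hne, ih rest h [c]]
          · by_cases hk : [c] = conn
            · subst hk
              simp [hp, hcc, hcr, hne, ih rest h [c]]
            · simp [hp, hcc, hcr, hne, hk]
        · rw [goA, goB]
          simp only [if_neg hp, if_neg hcc]
          exact ih rest h conn

-- ===== VERDICT (by name: the statement is the Claim_ definition above) =====
theorem is_ambiguous_spec : Claim_equal_is_ambiguous := by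
  intro s _
  unfold Spec_is_ambiguous is_ambiguous is_ambiguous_alt
  exact goA_eq_goB s.toList.length s.toList le_rfl []
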